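-- pv_equiv track=rewrite | github.com/Travelinkeo/travelhub_project | XYZ/scripts_legacy/main_universal.py | extract_sabre_itinerary
-- ===== SOURCE A (Python) =====
-- def extract_sabre_itinerary(text):
--     """Extrae itinerario de boleto SABRE"""
--     lines = text.splitlines()
--     itinerary_lines = []
--     capturing = False
--
--     for line in lines:
--         line = line.strip()
--         if not line:
--             continue
--
--         # Buscar inicio del itinerario
--         if not capturing and ('FROM/TO' in line.upper() or 'FLIGHT' in line.upper()):
--             capturing = True
--             continue
--
--         # Buscar fin del itinerario
--         if capturing and any(keyword in line.upper() for keyword in ['FARE CALC', 'ENDORSEMENTS', 'BAGGAGE']):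
--             break
--
--         if capturing:
--             itinerary_lines.append(line)
--
--     return '\n'.join(itinerary_lines) if itinerary_lines else "No se pudo extraer itinerario"
-- ===== SOURCE B (Python) =====
-- def extract_sabre_itinerary(text):
--     """Extrae itinerario de boleto SABRE (index/slice reformulation)."""
--     END_KEYS = ('FARE CALC', 'ENDORSEMENTS', 'BAGGAGE')
--     cleaned = [s for s in (ln.strip() for ln in text.splitlines()) if s]
--     uppers = [s.upper() for s in cleaned]
--     starts = [i for i, u in enumerate(uppers) if 'FROM/TO' in u or 'FLIGHT' in u]
--     if not starts:
--         return "No se pudo extraer itinerario"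
--     tail = cleaned[starts[0] + 1:]
--     tail_up = uppers[starts[0] + 1:]
--     ends = [i for i, u in enumerate(tail_up) if any(k in u for k in END_KEYS)]
--     body = tail[:ends[0]] if ends else tail
--     return '\n'.join(body) if body else "No se pudo extraer itinerario"
-- ===== Notes on version B (the rewrite author's own statement) =====
-- stated objective: alternative
-- what changed: Replaces A's stateful capturing-flag loop with break/continue by staged passes: strip-and-filter the lines, precompute uppercased copies, collect the index lists of start and end marker lines, and slice the cleaned list between the first start and first end index.
import Mathlib
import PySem

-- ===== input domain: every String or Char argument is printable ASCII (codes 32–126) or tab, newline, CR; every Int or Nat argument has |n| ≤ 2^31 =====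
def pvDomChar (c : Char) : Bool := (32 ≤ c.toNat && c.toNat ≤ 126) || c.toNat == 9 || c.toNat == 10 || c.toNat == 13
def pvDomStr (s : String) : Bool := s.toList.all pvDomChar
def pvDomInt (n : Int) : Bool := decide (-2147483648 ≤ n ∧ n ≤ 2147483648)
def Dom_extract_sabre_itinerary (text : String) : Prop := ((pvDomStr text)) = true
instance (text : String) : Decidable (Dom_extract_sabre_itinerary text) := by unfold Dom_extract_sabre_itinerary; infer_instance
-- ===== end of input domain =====

-- B replaces A's stateful capturing-flag loop by staged passes: clean the lines, compute the
-- index lists of start/end marker lines over an uppercased copy, and slice between them (objective: alternative).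

-- ===== PORT A =====
-- A's for-loop with `capturing`, `continue` and `break`, as structural recursion over the lines.
def extract_sabre_itinerary_loop : List String → Bool → List String → List String
  | [], _, acc => acc
  | l :: ls, capturing, acc =>
    let line := PySem.Str.strip l
    if line = "" then
      extract_sabre_itinerary_loop ls capturing acc
    else if !capturing && (PySem.Str.isIn "FROM/TO" (PySem.Str.upper line)
                           || PySem.Str.isIn "FLIGHT" (PySem.Str.upper line)) then
      extract_sabre_itinerary_loop ls true acc
    else if capturing && (["FARE CALC", "ENDORSEMENTS", "BAGGAGE"].any
                           fun keyword => PySem.Str.isIn keyword (PySem.Str.upper line)) then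
      acc  -- break
    else if capturing then
      extract_sabre_itinerary_loop ls capturing (acc ++ [line])
    else
      extract_sabre_itinerary_loop ls capturing acc

def extract_sabre_itinerary (text : String) : String :=
  let itinerary_lines := extract_sabre_itinerary_loop (PySem.Str.splitlines text) false []
  if itinerary_lines = [] then "No se pudo extraer itinerario"
  else PySem.Str.join "\n" itinerary_lines

-- ===== PORT B =====
-- predicates on an ALREADY-uppercased line (Source B tests the elements of `uppers`)
def pvStartU (u : String) : Bool :=
  PySem.Str.isIn "FROM/TO" u || PySem.Str.isIn "FLIGHT" u

def pvEndU (u : String) : Bool :=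
  ["FARE CALC", "ENDORSEMENTS", "BAGGAGE"].any fun k => PySem.Str.isIn k u

def extract_sabre_itinerary_alt (text : String) : String :=
  let cleaned := ((PySem.Str.splitlines text).map PySem.Str.strip).filter (fun s => !(s == ""))
  let uppers := cleaned.map PySem.Str.upper
  let starts := ((PySem.List.enumerate uppers).filter (fun x => pvStartU x.2)).map Prod.fst
  match starts with
  | [] => "No se pudo extraer itinerario"
  | i :: _ =>
    let tail := PySem.List.slice cleaned (some (i + 1)) none
    let tail_up := PySem.List.slice uppers (some (i + 1)) none
    let ends := ((PySem.List.enumerate tail_up).filter (fun x => pvEndU x.2)).map Prod.fst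
    let body : List String := match ends with
      | [] => tail
      | j :: _ => PySem.List.slice tail none (some j)
    if body = [] then "No se pudo extraer itinerario"
    else PySem.Str.join "\n" body

-- ===== PRECONDITION & SPEC =====
def Spec_extract_sabre_itinerary (text : String) (out : String) : Prop := out = extract_sabre_itinerary_alt text
instance (text : String) (out : String) : Decidable (Spec_extract_sabre_itinerary text out) := by unfold Spec_extract_sabre_itinerary; infer_instance

-- ===== CLAIM (what is proved, stated in full; the proofs are below) =====
def Claim_equal_extract_sabre_itinerary : Prop := ∀ (text : String), Dom_extract_sabre_itinerary text → Spec_extract_sabre_itinerary text (extract_sabre_itinerary text)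

-- ===== LEMMAS AND PROOFS =====

-- the line-level predicates A tests, expressed through B's uppercased predicates
def pvIsStart (s : String) : Bool := pvStartU (PySem.Str.upper s)
def pvIsEnd (s : String) : Bool := pvEndU (PySem.Str.upper s)

def pvClean (ls : List String) : List String :=
  (ls.map PySem.Str.strip).filter (fun s => !(s == ""))

-- the loop's inline conditions are definitionally these predicates
theorem pvCond_start (s : String) :
    (PySem.Str.isIn "FROM/TO" (PySem.Str.upper s) || PySem.Str.isIn "FLIGHT" (PySem.Str.upper s))
      = pvIsStart s := rfl

theorem pvCond_end (s : String) :
    (["FARE CALC", "ENDORSEMENTS", "BAGGAGE"].any fun keyword => PySem.Str.isIn keyword (PySem.Str.upper s))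
      = pvIsEnd s := rfl

-- capturing phase of A's loop = takeWhile over the cleaned remainder
theorem pvLoop_cap (ls : List String) (acc : List String) :
    extract_sabre_itinerary_loop ls true acc
      = acc ++ (pvClean ls).takeWhile (fun s => !pvIsEnd s) := by
  induction ls generalizing acc with
  | nil => simp [extract_sabre_itinerary_loop, pvClean]
  | cons l ls ih =>
    simp only [extract_sabre_itinerary_loop, pvCond_start, pvCond_end, pvClean,
               List.map_cons, List.filter_cons]
    by_cases h0 : PySem.Str.strip l = ""
    · simp [h0, ih, pvClean]
    · by_cases hend : pvIsEnd (PySem.Str.strip l) = true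
      · simp [h0, hend]
      · simp [h0, hend, ih, pvClean]

-- searching phase of A's loop = dropWhile to the start marker, drop it, then the capturing phase
theorem pvLoop_notcap (ls : List String) (acc : List String) :
    extract_sabre_itinerary_loop ls false acc
      = acc ++ (((pvClean ls).dropWhile (fun s => !pvIsStart s)).drop 1).takeWhile (fun s => !pvIsEnd s) := by
  induction ls generalizing acc with
  | nil => simp [extract_sabre_itinerary_loop, pvClean]
  | cons l ls ih =>
    simp only [extract_sabre_itinerary_loop, pvCond_start, pvCond_end, pvClean,
               List.map_cons, List.filter_cons]
    by_cases h0 : PySem.Str.strip l = ""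
    · simp [h0, ih, pvClean]
    · by_cases hst : pvIsStart (PySem.Str.strip l) = true
      · simp [h0, hst, pvLoop_cap, pvClean]
      · simp [h0, hst, ih, pvClean]

-- first-index lemmas: the head of the filtered enumerate index list locates takeWhile/dropWhile
theorem pvIdx_nil {α : Type} (P : α → Bool) (s : Int) (l : List α)
    (h : ((PySem.List.enumerate l s).filter (fun x => P x.2)).map Prod.fst = []) :
    l.takeWhile (fun a => !P a) = l ∧ l.dropWhile (fun a => !P a) = [] := by
  induction l generalizing s with
  | nil => simp
  | cons a l ih =>
    simp only [PySem.List.enumerate_cons, List.filter_cons] at h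
    by_cases hp : P a = true
    · simp [hp] at h
    · simp only [hp, Bool.false_eq_true, if_false] at h
      have := ih (s + 1) (by simpa [hp] using h)
      simp [List.takeWhile_cons, List.dropWhile_cons, hp, this.1, this.2]

theorem pvIdx_cons {α : Type} (P : α → Bool) (s : Int) (l : List α) (i : Int) (r : List Int)
    (h : ((PySem.List.enumerate l s).filter (fun x => P x.2)).map Prod.fst = i :: r) :
    ∃ k : Nat, i = s + (k : Int)
      ∧ l.takeWhile (fun a => !P a) = l.take k
      ∧ l.dropWhile (fun a => !P a) = l.drop k := by
  induction l generalizing s i r with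
  | nil => simp at h
  | cons a l ih =>
    simp only [PySem.List.enumerate_cons, List.filter_cons] at h
    by_cases hp : P a = true
    · simp only [hp, if_pos, List.map_cons, List.cons.injEq] at h
      exact ⟨0, by simpa using h.1.symm, by simp [hp], by simp [hp]⟩
    · simp only [hp, Bool.false_eq_true, if_false] at h
      obtain ⟨k, hk, ht, hd⟩ := ih (s + 1) i r (by simpa [hp] using h)
      exact ⟨k + 1, by omega, by simp [List.takeWhile_cons, hp, ht],
             by simp [List.dropWhile_cons, hp, hd]⟩

-- filtering the enumerate of a mapped list = filtering the enumerate with the composed predicate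
theorem pvEnum_map {α β : Type} (f : α → β) (P : β → Bool) (s : Int) (l : List α) :
    ((PySem.List.enumerate (l.map f) s).filter (fun x => P x.2)).map Prod.fst
      = ((PySem.List.enumerate l s).filter (fun x => P (f x.2))).map Prod.fst := by
  induction l generalizing s with
  | nil => simp
  | cons a l ih =>
    simp only [List.map_cons, PySem.List.enumerate_cons, List.filter_cons]
    by_cases hp : P (f a) = true
    · simp [hp, ih]
    · simp [hp, ih]

-- ===== VERDICT (by name: the statement is the Claim_ definition above) =====
theorem extract_sabre_itinerary_spec : Claim_equal_extract_sabre_itinerary := by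
  intro text _
  unfold Spec_extract_sabre_itinerary extract_sabre_itinerary extract_sabre_itinerary_alt
  simp only [pvLoop_notcap, List.nil_append]
  have hfold : ((PySem.Str.splitlines text).map PySem.Str.strip).filter (fun s => !(s == ""))
      = pvClean (PySem.Str.splitlines text) := rfl
  rw [hfold]
  set l := pvClean (PySem.Str.splitlines text) with hl
  rw [pvEnum_map PySem.Str.upper pvStartU 0 l]
  cases hs : ((PySem.List.enumerate l 0).filter (fun x => pvStartU (PySem.Str.upper x.2))).map Prod.fst with
  | nil =>
    have h := pvIdx_nil (fun a => pvIsStart a) 0 l hs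
    have h2 : l.dropWhile (fun s => !pvIsStart s) = [] := by simpa using h.2
    dsimp only
    simp [h2]
  | cons i r =>
    obtain ⟨k, hk, _, hd⟩ := pvIdx_cons (fun a => pvIsStart a) 0 l i r hs
    dsimp only
    have hi1 : i + 1 = ((k + 1 : Nat) : Int) := by omega
    have htailc : PySem.List.slice l (some (i + 1)) none = l.drop (k + 1) := by
      rw [hi1, PySem.List.slice_from_natCast]
    have htailu : PySem.List.slice (l.map PySem.Str.upper) (some (i + 1)) none
        = (l.drop (k + 1)).map PySem.Str.upper := by
      rw [hi1, PySem.List.slice_from_natCast, List.map_drop]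
    have hdrop : (l.dropWhile (fun s => !pvIsStart s)).drop 1 = l.drop (k + 1) := by
      rw [hd, List.drop_drop]
    rw [htailc, htailu, hdrop, pvEnum_map PySem.Str.upper pvEndU 0 (l.drop (k + 1))]
    cases he : ((PySem.List.enumerate (l.drop (k + 1)) 0).filter (fun x => pvEndU (PySem.Str.upper x.2))).map Prod.fst with
    | nil =>
      have h := pvIdx_nil (fun a => pvIsEnd a) 0 (l.drop (k + 1)) he
      have h1 : (l.drop (k + 1)).takeWhile (fun s => !pvIsEnd s) = l.drop (k + 1) := by simpa using h.1
      dsimp only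
      simp [h1]
    | cons j r' =>
      obtain ⟨m, hm, htw, _⟩ := pvIdx_cons (fun a => pvIsEnd a) 0 (l.drop (k + 1)) j r' he
      dsimp only
      have hj : j = ((m : Nat) : Int) := by omega
      have hsl : PySem.List.slice (l.drop (k + 1)) none (some j) = (l.drop (k + 1)).take m := by
        rw [hj, PySem.List.slice_to_natCast]
      have htw' : (l.drop (k + 1)).takeWhile (fun s => !pvIsEnd s) = (l.drop (k + 1)).take m := by simpa using htw
      simp [hsl, htw']
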